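-- pv_equiv track=rewrite | github.com/JohnChourp/LearnByzantineMusic | scripts/fill_calendar_month.py | normalize_line_breaks
-- ===== SOURCE A (Python) =====
-- from typing import Dict, List, Tuple
--
-- def normalize_line_breaks(value: str) -> str:
--     lines = [line.strip() for line in value.splitlines()]
--     compact: List[str] = []
--     previous_blank = False
--     for line in lines:
--         if not line:
--             if not previous_blank:
--                 compact.append("")
--             previous_blank = True
--             continue
--         compact.append(line)
--         previous_blank = False
--     return "\n".join(compact).strip()
-- ===== SOURCE B (Python) =====
-- def normalize_line_breaks(value: str) -> str:
--     lines = [line.strip() for line in value.splitlines()]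
--     kept = [cur for prev, cur in zip([""] + lines, lines) if cur or prev]
--     return "\n".join(kept).strip()
-- ===== Notes on version B (the rewrite author's own statement) =====
-- stated objective: simpler
-- what changed: Replaces A's stateful accumulator loop (previous_blank flag plus conditional appends) with a stateless comprehension that zips each stripped line with its predecessor and keeps a line iff it or its predecessor is non-blank.
import Mathlib
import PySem

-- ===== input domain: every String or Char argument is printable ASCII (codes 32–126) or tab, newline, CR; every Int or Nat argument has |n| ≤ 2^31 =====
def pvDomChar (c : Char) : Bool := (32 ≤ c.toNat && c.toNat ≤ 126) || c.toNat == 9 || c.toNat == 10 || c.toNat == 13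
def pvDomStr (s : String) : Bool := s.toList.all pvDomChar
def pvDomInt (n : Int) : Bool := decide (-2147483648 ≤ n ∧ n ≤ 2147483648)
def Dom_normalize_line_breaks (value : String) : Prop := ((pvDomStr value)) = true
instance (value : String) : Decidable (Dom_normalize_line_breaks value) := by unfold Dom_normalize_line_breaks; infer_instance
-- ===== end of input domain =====

-- B replaces A's stateful accumulator loop (previous_blank flag + append) by a stateless
-- pairwise filter: each line is zipped with its predecessor and kept iff one of the two is
-- non-blank; objective: simpler.

-- ===== PORT A =====
def normalize_line_breaks (value : String) : String :=
  let lines := (PySem.Str.splitlines value).map PySem.Str.strip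
  let res := lines.foldl (fun (st : List String × Bool) line =>
      if line = "" then
        ((if st.2 then st.1 else st.1 ++ [""]), true)
      else (st.1 ++ [line], false)) ([], false)
  PySem.Str.strip (PySem.Str.join "\n" res.1)

-- ===== PORT B =====
def normalize_line_breaks_alt (value : String) : String :=
  let lines := (PySem.Str.splitlines value).map PySem.Str.strip
  let kept := ((List.zip ("" :: lines) lines).filter
      (fun q => !(q.2 == "") || !(q.1 == ""))).map (·.2)
  PySem.Str.strip (PySem.Str.join "\n" kept)

-- ===== PRECONDITION & SPEC =====
def Spec_normalize_line_breaks (value : String) (out : String) : Prop := out = normalize_line_breaks_alt value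
instance (value : String) (out : String) : Decidable (Spec_normalize_line_breaks value out) := by unfold Spec_normalize_line_breaks; infer_instance

-- ===== CLAIM (what is proved, stated in full; the proofs are below) =====
def Claim_equal_normalize_line_breaks : Prop := ∀ (value : String), Dom_normalize_line_breaks value → Spec_normalize_line_breaks value (normalize_line_breaks value)

-- ===== LEMMAS AND PROOFS =====

-- collapse runs of "" to a single "" (pb = a blank was just seen)
def cgo : Bool → List String → List String
  | _, [] => []
  | pb, x :: xs =>
      if x = "" then (if pb then cgo true xs else "" :: cgo true xs)
      else x :: cgo false xs

theorem foldA (xs : List String) (acc : List String) (pb : Bool) :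
    (xs.foldl (fun (st : List String × Bool) line =>
      if line = "" then
        ((if st.2 then st.1 else st.1 ++ [""]), true)
      else (st.1 ++ [line], false)) (acc, pb)).1 = acc ++ cgo pb xs := by
  induction xs generalizing acc pb with
  | nil => simp [cgo]
  | cons x xs ih =>
      by_cases hx : x = "" <;> cases pb <;> simp [cgo, hx, List.foldl_cons, ih]

theorem zipB (L : List String) (p : String) :
    ((List.zip (p :: L) L).filter (fun q => !(q.2 == "") || !(q.1 == ""))).map (·.2)
      = cgo (p == "") L := by
  induction L generalizing p with
  | nil => simp [cgo]
  | cons x xs ih =>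
      have hb : ∀ (s : String), ¬ s = "" → (s == "") = false := fun s h => by
        simpa using h
      by_cases hx : x = "" <;> by_cases hp : p = "" <;>
        simp [cgo, hx, hp, List.zip_cons_cons, ih, hb x, hb p]

theorem strip_newline_cons (cs : List Char) :
    PySem.Chars.strip ('\n' :: cs) = PySem.Chars.strip cs := by
  have h : PySem.Chars.isspace '\n' = true := by decide
  simp [PySem.Chars.strip, PySem.Chars.lstrip, List.dropWhile, h]

theorem strip_join_blank_head (M : List String) :
    PySem.Str.strip (PySem.Str.join "\n" ("" :: M)) = PySem.Str.strip (PySem.Str.join "\n" M) := by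
  cases M with
  | nil => rfl
  | cons m ms =>
      simp only [PySem.Str.join, PySem.Str.strip, PySem.Chars.join, List.map_cons,
        String.toList_empty]
      rw [show ("\n" : String).toList = ['\n'] from rfl, String.toList_ofList,
        String.toList_ofList]
      rw [show List.intercalate ['\n'] ([] :: m.toList :: List.map String.toList ms)
            = '\n' :: List.intercalate ['\n'] (m.toList :: List.map String.toList ms) from by
          simp [List.intercalate]]
      simp [strip_newline_cons]

theorem head_case (L : List String) :
    PySem.Str.strip (PySem.Str.join "\n" (cgo false L))
      = PySem.Str.strip (PySem.Str.join "\n" (cgo true L)) := by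
  cases L with
  | nil => rfl
  | cons x xs =>
      by_cases hx : x = ""
      · simp [cgo, hx, strip_join_blank_head]
      · simp [cgo, hx]

-- ===== VERDICT (by name: the statement is the Claim_ definition above) =====
theorem normalize_line_breaks_spec : Claim_equal_normalize_line_breaks := by
  intro value _
  unfold Spec_normalize_line_breaks normalize_line_breaks normalize_line_breaks_alt
  simp only [foldA, zipB, List.nil_append]
  simpa using head_case ((PySem.Str.splitlines value).map PySem.Str.strip)
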